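-- pv_equiv track=rewrite | github.com/PeterSalvato/AI-Devops-Workbench | orchestration-engine/intelligence_engine.py | _classify_overlap_type
-- ===== SOURCE A (Python) =====
-- from typing import Dict, List, Any, Optional, Tuple
--
-- def _classify_overlap_type(overlap_areas: List[str]) -> str:
--     """Classify the type of overlap detected"""
--
--     if any('technical_decision' in area for area in overlap_areas):
--         return 'decision_overlap'
--     elif any('domain_expertise' in area for area in overlap_areas):
--         return 'expertise_overlap'
--     elif any('recommendation_area' in area for area in overlap_areas):
--         return 'recommendation_overlap'
--     else:
--         return 'general_overlap'
-- ===== SOURCE B (Python) =====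
-- _LABELS = ['decision_overlap', 'expertise_overlap', 'recommendation_overlap', 'general_overlap']
-- _KEYWORDS = ['technical_decision', 'domain_expertise', 'recommendation_area']
--
-- def _rank(area):
--     """Priority rank of a single area: index of the first keyword it contains, else 3."""
--     for i, kw in enumerate(_KEYWORDS):
--         if kw in area:
--             return i
--     return 3
--
-- def _classify_overlap_type(overlap_areas):
--     """Classify the type of overlap detected: minimum priority rank over all areas, mapped through a label table."""
--     best = min(map(_rank, overlap_areas), default=3)
--     return _LABELS[best]
-- ===== Notes on version B (the rewrite author's own statement) =====
-- stated objective: alternative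
-- what changed: Replaced the chain of three priority-ordered any() scans and returns by a numeric formulation: each area is mapped to a priority rank (index of the first matching keyword, else 3), the minimum rank over the list is taken, and the answer is a table lookup - priority is arithmetic (min) rather than control flow.
import Mathlib
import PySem

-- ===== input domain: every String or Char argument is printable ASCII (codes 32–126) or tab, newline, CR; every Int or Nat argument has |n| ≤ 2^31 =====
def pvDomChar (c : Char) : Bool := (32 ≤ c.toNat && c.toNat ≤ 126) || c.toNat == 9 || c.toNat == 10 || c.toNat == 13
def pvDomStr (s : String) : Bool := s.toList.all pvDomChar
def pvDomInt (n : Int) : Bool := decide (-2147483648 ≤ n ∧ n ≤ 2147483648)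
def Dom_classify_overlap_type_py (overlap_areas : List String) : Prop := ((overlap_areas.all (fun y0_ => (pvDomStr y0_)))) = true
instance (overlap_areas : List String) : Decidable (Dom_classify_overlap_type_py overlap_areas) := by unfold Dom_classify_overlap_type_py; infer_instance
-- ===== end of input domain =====

-- B recasts A's chain of three priority-ordered any() scans as arithmetic: map each area to a
-- numeric priority rank (index of the first matching keyword, else 3), take the minimum rank,
-- and look the answer up in a label table (objective: alternative decomposition, same cost).

-- ===== PORT A =====
def classify_overlap_type_py (overlap_areas : List String) : String :=
  if overlap_areas.any (fun area => PySem.Str.isIn "technical_decision" area) then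
    "decision_overlap"
  else if overlap_areas.any (fun area => PySem.Str.isIn "domain_expertise" area) then
    "expertise_overlap"
  else if overlap_areas.any (fun area => PySem.Str.isIn "recommendation_area" area) then
    "recommendation_overlap"
  else
    "general_overlap"

-- ===== PORT B =====
def pvLabels : List String :=
  ["decision_overlap", "expertise_overlap", "recommendation_overlap", "general_overlap"]

def pvKeywords : List String :=
  ["technical_decision", "domain_expertise", "recommendation_area"]

/-- Priority rank of a single area: index of the first keyword it contains, else 3
    (the `for i, kw in enumerate(...)` loop with early return = first match on the
    enumerated keyword list). -/
def pvRank (area : String) : Int :=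
  match (PySem.List.enumerate pvKeywords).find? (fun p => PySem.Str.isIn p.2 area) with
  | some p => p.1
  | none => 3

def classify_overlap_type_py_alt (overlap_areas : List String) : String :=
  let best := (overlap_areas.map pvRank).foldl min 3
  (PySem.List.pyGet? pvLabels best).getD ""

-- ===== PRECONDITION & SPEC =====
def Spec_classify_overlap_type_py (overlap_areas : List String) (out : String) : Prop := out = classify_overlap_type_py_alt overlap_areas
instance (overlap_areas : List String) (out : String) : Decidable (Spec_classify_overlap_type_py overlap_areas out) := by unfold Spec_classify_overlap_type_py; infer_instance

-- ===== CLAIM (what is proved, stated in full; the proofs are below) =====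
def Claim_equal_classify_overlap_type_py : Prop := ∀ (overlap_areas : List String), Dom_classify_overlap_type_py overlap_areas → Spec_classify_overlap_type_py overlap_areas (classify_overlap_type_py overlap_areas)

-- ===== LEMMAS AND PROOFS =====

/-- The rank chain, spelled out on the three keywords. -/
theorem pvRank_eq (a : String) :
    pvRank a =
      if PySem.Str.isIn "technical_decision" a then 0
      else if PySem.Str.isIn "domain_expertise" a then 1
      else if PySem.Str.isIn "recommendation_area" a then 2
      else 3 := by
  simp only [pvRank, pvKeywords, PySem.List.enumerate_cons, PySem.List.enumerate_nil,
    List.find?]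
  split_ifs <;> simp_all

/-- The minimum rank over a list, as the priority chain of the three `any` tests. -/
def pvBest (l : List String) : Int :=
  if l.any (fun a => PySem.Str.isIn "technical_decision" a) then 0
  else if l.any (fun a => PySem.Str.isIn "domain_expertise" a) then 1
  else if l.any (fun a => PySem.Str.isIn "recommendation_area" a) then 2
  else 3

theorem pvBest_le (l : List String) : pvBest l ≤ 3 := by
  unfold pvBest; split_ifs <;> omega

/-- Pure boolean/arithmetic core of the fold step. -/
theorem min_chain (t d r u v w : Bool) :
    min (if t then (0:Int) else if d then 1 else if r then 2 else 3)
        (if u then (0:Int) else if v then 1 else if w then 2 else 3)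
      = if (t || u) then (0:Int) else if (d || v) then 1 else if (r || w) then 2 else 3 := by
  cases t <;> cases d <;> cases r <;> cases u <;> cases v <;> cases w <;> decide

theorem pvLookup0 : (PySem.List.pyGet? pvLabels 0).getD "" = "decision_overlap" := by rfl
theorem pvLookup1 : (PySem.List.pyGet? pvLabels 1).getD "" = "expertise_overlap" := by rfl
theorem pvLookup2 : (PySem.List.pyGet? pvLabels 2).getD "" = "recommendation_overlap" := by rfl
theorem pvLookup3 : (PySem.List.pyGet? pvLabels 3).getD "" = "general_overlap" := by rfl

theorem foldl_min_eq (l : List String) (b : Int) (hb : b ≤ 3) :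
    (l.map pvRank).foldl min b = min b (pvBest l) := by
  induction l generalizing b with
  | nil => simp [pvBest]; omega
  | cons x xs ih =>
      have hr : min b (pvRank x) ≤ 3 := by
        have := pvRank_eq x
        split_ifs at this <;> omega
      rw [List.map_cons, List.foldl_cons, ih _ hr, min_assoc]
      congr 1
      rw [pvRank_eq]
      unfold pvBest
      simp only [List.any_cons]
      exact min_chain _ _ _ _ _ _

-- ===== VERDICT (by name: the statement is the Claim_ definition above) =====
theorem classify_overlap_type_py_spec : Claim_equal_classify_overlap_type_py := by
  intro l _
  unfold Spec_classify_overlap_type_py classify_overlap_type_py classify_overlap_type_py_alt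
  rw [foldl_min_eq l 3 (by omega)]
  have h3 := pvBest_le l
  have h0 : 0 ≤ pvBest l := by unfold pvBest; split_ifs <;> omega
  have hmin : min (3:Int) (pvBest l) = pvBest l := by omega
  rw [hmin]
  unfold pvBest
  split_ifs <;>
    first
      | exact pvLookup0.symm
      | exact pvLookup1.symm
      | exact pvLookup2.symm
      | exact pvLookup3.symm
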